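-- pv_equiv track=rewrite | github.com/alyonkapetrova/apply_math | forestry/forestry.py | forest_cut
-- ===== SOURCE A (Python) =====
-- def forest_cut(truck):
--
--     cut = 0
--     profit = 0
--
--     for trunk in truck:
--         for i in range(0, len(trunk)):
--             if trunk[i] == 1:
--                 if i == len(trunk) - 1 and trunk[i - 1] == 1:
--                     profit += 200
--                 elif i == 0 or i == len(trunk) - 1:
--                     cut += 50
--                     profit += 200
--                 elif trunk[i - 1] == 0 and trunk[i + 1] == 0 or trunk[i - 1] == 0 and trunk[i + 1] == 1:
--                     cut += 100
--                     profit += 200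
--                 else:
--                     cut += 50
--                     profit += 200
--
--     total = profit - cut
--     return total
-- ===== SOURCE B (Python) =====
-- def trunk_value(trunk):
--     ones = trunk.count(1)
--     extra = sum(1 for p, v, nx in zip(trunk, trunk[1:], trunk[2:])
--                 if v == 1 and p == 0 and nx in (0, 1))
--     free = 1 if len(trunk) >= 2 and trunk[-1] == 1 and trunk[-2] == 1 else 0
--     return 150 * ones - 50 * extra + 50 * free
--
-- def forest_cut(truck):
--     return sum(trunk_value(trunk) for trunk in truck)
-- ===== Notes on version B (the rewrite author's own statement) =====
-- stated objective: simpler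
-- what changed: Replaces A's single branchy index loop accumulating (cut, profit) with per-trunk closed counts: profit is 200*count(1), the extra interior cut is counted over zip(t,t[1:],t[2:]) windows and the trailing refund by one closed end-of-list test, combined arithmetically.
-- intended difference: On trucks containing a length-1 trunk [1], A's negative-index wraparound (trunk[i-1] is trunk[-1], the element itself) charges no cut and counts 200 for the lone log, while B charges the intended 50 edge cut and counts 150. — e.g. on forest_cut([[1]]): A returns 200, B returns 150
import Mathlib
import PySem

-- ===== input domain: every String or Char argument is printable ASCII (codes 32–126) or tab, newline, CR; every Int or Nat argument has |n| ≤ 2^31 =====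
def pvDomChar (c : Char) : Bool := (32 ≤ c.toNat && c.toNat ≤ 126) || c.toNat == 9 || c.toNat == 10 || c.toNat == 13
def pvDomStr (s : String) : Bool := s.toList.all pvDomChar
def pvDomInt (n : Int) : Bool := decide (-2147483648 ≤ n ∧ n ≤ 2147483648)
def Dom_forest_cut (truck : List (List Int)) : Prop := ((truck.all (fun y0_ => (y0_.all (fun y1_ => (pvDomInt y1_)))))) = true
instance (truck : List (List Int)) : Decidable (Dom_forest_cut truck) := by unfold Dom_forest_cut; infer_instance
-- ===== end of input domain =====

-- B computes the same total by per-trunk closed counts (200·#ones minus a cut derived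
-- from three counters) instead of A's branchy index loop; on singleton trunks [1] A's
-- negative-index wraparound charges no cut and B charges the intended edge cut of 50.

-- ===== PORT A =====
def forest_cut (truck : List (List Int)) : Int :=
  let cp := truck.foldl (fun (cp : Int × Int) trunk =>
    (PySem.List.pyRange 0 (trunk.length : Int) 1).foldl (fun (cp : Int × Int) i =>
      if PySem.List.pyGetD trunk i 0 = 1 then
        if i = (trunk.length : Int) - 1 ∧ PySem.List.pyGetD trunk (i - 1) 0 = 1 then
          (cp.1, cp.2 + 200)
        else if i = 0 ∨ i = (trunk.length : Int) - 1 then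
          (cp.1 + 50, cp.2 + 200)
        else if (PySem.List.pyGetD trunk (i - 1) 0 = 0 ∧ PySem.List.pyGetD trunk (i + 1) 0 = 0) ∨
                (PySem.List.pyGetD trunk (i - 1) 0 = 0 ∧ PySem.List.pyGetD trunk (i + 1) 0 = 1) then
          (cp.1 + 100, cp.2 + 200)
        else
          (cp.1 + 50, cp.2 + 200)
      else cp) cp) ((0 : Int), (0 : Int))
  cp.2 - cp.1

-- ===== PORT B =====
-- 'sum(1 for … if cond)' over the zipped windows is ported as countP (count of windows
-- satisfying the condition), cast to Int; trunk[1:] / trunk[2:] via PySem slices.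
def trunk_value (trunk : List Int) : Int :=
  let ones : Int := (PySem.List.count trunk 1 : Nat)
  let extra : Int :=
    (((trunk.zip (PySem.List.slice trunk (some 1) none)).zip (PySem.List.slice trunk (some 2) none)).countP
      (fun w => w.1.2 = 1 ∧ w.1.1 = 0 ∧ (w.2 = 0 ∨ w.2 = 1)) : Nat)
  let free : Int :=
    if 2 ≤ trunk.length ∧ PySem.List.pyGetD trunk (-1) 0 = 1 ∧ PySem.List.pyGetD trunk (-2) 0 = 1 then 1 else 0
  150 * ones - 50 * extra + 50 * free

def forest_cut_alt (truck : List (List Int)) : Int :=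
  (truck.map trunk_value).sum

-- ===== PRECONDITION & SPEC =====
-- On trucks containing a length-1 trunk [1], A's wraparound trunk[i-1]=trunk[-1] makes the
-- lone log cost no cut (A adds 200 for it); B charges the intended 50 edge cut (adds 150).
def D_forest_cut (truck : List (List Int)) : Prop := [1] ∈ truck
instance (truck : List (List Int)) : Decidable (D_forest_cut truck) := by unfold D_forest_cut; infer_instance

def Spec_forest_cut (truck : List (List Int)) (out : Int) : Prop := ¬ D_forest_cut truck → out = forest_cut_alt truck
instance (truck : List (List Int)) (out : Int) : Decidable (Spec_forest_cut truck out) := by unfold Spec_forest_cut; infer_instance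

def pvDiffWitness_forest_cut : List (List Int) := [[1]]
def pvDiffWitnessOut_forest_cut : Int × Int := (200, 150)

-- ===== CLAIM (what is proved, stated in full; the proofs are below) =====
def Claim_unchanged_forest_cut : Prop := ∀ (truck : List (List Int)), Dom_forest_cut truck → Spec_forest_cut truck (forest_cut truck)
def Claim_changed_forest_cut : Prop := Dom_forest_cut (pvDiffWitness_forest_cut) ∧ D_forest_cut (pvDiffWitness_forest_cut) ∧ forest_cut (pvDiffWitness_forest_cut) = pvDiffWitnessOut_forest_cut.1 ∧ forest_cut_alt (pvDiffWitness_forest_cut) = pvDiffWitnessOut_forest_cut.2 ∧ pvDiffWitnessOut_forest_cut.1 ≠ pvDiffWitnessOut_forest_cut.2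
def Claim_exact_forest_cut : Prop := ∀ (truck : List (List Int)), Dom_forest_cut truck → D_forest_cut truck → forest_cut truck ≠ forest_cut_alt truck



-- ===== LEMMAS AND PROOFS =====

-- A's inner loop body as a named step function (definitionally the lambda in forest_cut).
def pvStep (t : List Int) (cp : Int × Int) (i : Int) : Int × Int :=
  if PySem.List.pyGetD t i 0 = 1 then
    if i = (t.length : Int) - 1 ∧ PySem.List.pyGetD t (i - 1) 0 = 1 then
      (cp.1, cp.2 + 200)
    else if i = 0 ∨ i = (t.length : Int) - 1 then
      (cp.1 + 50, cp.2 + 200)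
    else if (PySem.List.pyGetD t (i - 1) 0 = 0 ∧ PySem.List.pyGetD t (i + 1) 0 = 0) ∨
            (PySem.List.pyGetD t (i - 1) 0 = 0 ∧ PySem.List.pyGetD t (i + 1) 0 = 1) then
      (cp.1 + 100, cp.2 + 200)
    else
      (cp.1 + 50, cp.2 + 200)
  else cp

-- the cut added at index i, and the profit added at index i
def pvCamt (t : List Int) (i : Int) : Int :=
  if PySem.List.pyGetD t i 0 = 1 then
    if i = (t.length : Int) - 1 ∧ PySem.List.pyGetD t (i - 1) 0 = 1 then 0
    else if i = 0 ∨ i = (t.length : Int) - 1 then 50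
    else if (PySem.List.pyGetD t (i - 1) 0 = 0 ∧ PySem.List.pyGetD t (i + 1) 0 = 0) ∨
            (PySem.List.pyGetD t (i - 1) 0 = 0 ∧ PySem.List.pyGetD t (i + 1) 0 = 1) then 100
    else 50
  else 0

def pvPamt (t : List Int) (i : Int) : Int :=
  if PySem.List.pyGetD t i 0 = 1 then 200 else 0

def pvCsum (t : List Int) : Int :=
  ((PySem.List.pyRange 0 (t.length : Int) 1).map (pvCamt t)).sum

def pvPsum (t : List Int) : Int :=
  ((PySem.List.pyRange 0 (t.length : Int) 1).map (pvPamt t)).sum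

-- interior 1 with prev 0 and next in {0,1} (extra 50 of cut), trailing 1 after a 1 (refunded 50)
def pvE2 (t : List Int) (i : Int) : Int :=
  if 0 < i ∧ i < (t.length : Int) - 1 ∧ PySem.List.pyGetD t i 0 = 1 ∧
     PySem.List.pyGetD t (i - 1) 0 = 0 ∧
     (PySem.List.pyGetD t (i + 1) 0 = 0 ∨ PySem.List.pyGetD t (i + 1) 0 = 1) then 50 else 0

def pvE3 (t : List Int) (i : Int) : Int :=
  if i = (t.length : Int) - 1 ∧ PySem.List.pyGetD t i 0 = 1 ∧
     PySem.List.pyGetD t (i - 1) 0 = 1 then 50 else 0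

def pvWcount : List Int → Int
  | a :: b :: c :: r => (if b = 1 ∧ a = 0 ∧ (c = 0 ∨ c = 1) then 1 else 0) + pvWcount (b :: c :: r)
  | _ => 0

def pvFreeA (t : List Int) : Int :=
  if PySem.List.pyGetD t ((t.length : Int) - 1) 0 = 1 ∧
     PySem.List.pyGetD t ((t.length : Int) - 2) 0 = 1 then 1 else 0

def pvFreeB (t : List Int) : Int :=
  if 2 ≤ t.length ∧ PySem.List.pyGetD t (-1) 0 = 1 ∧ PySem.List.pyGetD t (-2) 0 = 1 then 1 else 0

def pvInd (t : List Int) : Int := if t = [1] then 1 else 0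

lemma pvStep_eq (t : List Int) (cp : Int × Int) (i : Int) :
    pvStep t cp i = (cp.1 + pvCamt t i, cp.2 + pvPamt t i) := by
  unfold pvStep pvCamt pvPamt
  split_ifs <;> simp

lemma pvFoldl_step (t : List Int) (l : List Int) :
    ∀ cp : Int × Int, l.foldl (pvStep t) cp =
      (cp.1 + (l.map (pvCamt t)).sum, cp.2 + (l.map (pvPamt t)).sum) := by
  induction l with
  | nil => intro cp; simp
  | cons a l ih =>
      intro cp
      simp only [List.foldl_cons, List.map_cons, List.sum_cons]
      rw [pvStep_eq, ih]
      dsimp only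
      rw [Prod.mk.injEq]
      exact ⟨by ring, by ring⟩

lemma pvOuter (truck : List (List Int)) :
    ∀ cp : Int × Int,
      truck.foldl (fun cp t => (PySem.List.pyRange 0 (t.length : Int) 1).foldl (pvStep t) cp) cp =
        (cp.1 + (truck.map pvCsum).sum, cp.2 + (truck.map pvPsum).sum) := by
  induction truck with
  | nil => intro cp; simp
  | cons t truck ih =>
      intro cp
      simp only [List.foldl_cons, List.map_cons, List.sum_cons]
      rw [pvFoldl_step, ih]
      dsimp only
      simp only [pvCsum, pvPsum]
      rw [Prod.mk.injEq]
      exact ⟨by ring, by ring⟩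

lemma pvSum_sub {α : Type} (l : List α) (f g : α → Int) :
    (l.map (fun x => f x - g x)).sum = (l.map f).sum - (l.map g).sum := by
  induction l with
  | nil => simp
  | cons a l ih => simp only [List.map_cons, List.sum_cons, ih]; ring

lemma pvSum_add {α : Type} (l : List α) (f g : α → Int) :
    (l.map (fun x => f x + g x)).sum = (l.map f).sum + (l.map g).sum := by
  induction l with
  | nil => simp
  | cons a l ih => simp only [List.map_cons, List.sum_cons, ih]; ring

lemma pvSum_mul {α : Type} (l : List α) (f : α → Int) (c : Int) :
    (l.map (fun x => c * f x)).sum = c * (l.map f).sum := by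
  induction l with
  | nil => simp
  | cons a l ih => simp only [List.map_cons, List.sum_cons, ih]; ring

lemma pvForest_cut_eq (truck : List (List Int)) :
    forest_cut truck = (truck.map (fun t => pvPsum t - pvCsum t)).sum := by
  have h : forest_cut truck =
      (truck.foldl (fun cp t => (PySem.List.pyRange 0 (t.length : Int) 1).foldl (pvStep t) cp)
        ((0 : Int), (0 : Int))).2 -
      (truck.foldl (fun cp t => (PySem.List.pyRange 0 (t.length : Int) 1).foldl (pvStep t) cp)
        ((0 : Int), (0 : Int))).1 := rfl
  rw [h, pvOuter, pvSum_sub]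
  simp

lemma pvMap_range_eq (t : List Int) (g : Int → Int) :
    (PySem.List.pyRange 0 (t.length : Int) 1).map (fun i => g (PySem.List.pyGetD t i 0)) = t.map g := by
  conv_rhs => rw [← PySem.List.map_pyGetD_pyRange_zero' t (0 : Int)]
  rw [List.map_map]
  rfl

lemma pvSum_if_count (t : List Int) (c : Int) :
    (t.map (fun x => if x = (1 : Int) then c else 0)).sum = c * (t.count 1 : Int) := by
  induction t with
  | nil => simp
  | cons a l ih =>
      by_cases h : a = (1 : Int)
      · simp [h, ih]
        ring
      · simp [h, ih]

lemma pvPsum_eq (t : List Int) : pvPsum t = 200 * (t.count 1 : Int) := by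
  unfold pvPsum
  have h : (PySem.List.pyRange 0 (t.length : Int) 1).map (pvPamt t) =
      t.map (fun x => if x = (1 : Int) then (200 : Int) else 0) := by
    have h0 := pvMap_range_eq t (fun x => if x = (1 : Int) then (200 : Int) else 0)
    exact h0
  rw [h, pvSum_if_count]

lemma pvCamt_decomp (t : List Int) (i : Int) (h0 : 0 ≤ i) (h1 : i < (t.length : Int)) :
    pvCamt t i = (if PySem.List.pyGetD t i 0 = 1 then (50 : Int) else 0) + pvE2 t i - pvE3 t i := by
  unfold pvCamt pvE2 pvE3
  split_ifs <;> omega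

lemma pvCsum_eq (t : List Int) :
    pvCsum t = 50 * (t.count 1 : Int) +
      ((PySem.List.pyRange 0 (t.length : Int) 1).map (pvE2 t)).sum -
      ((PySem.List.pyRange 0 (t.length : Int) 1).map (pvE3 t)).sum := by
  unfold pvCsum
  have h : (PySem.List.pyRange 0 (t.length : Int) 1).map (pvCamt t) =
      (PySem.List.pyRange 0 (t.length : Int) 1).map
        (fun i => ((if PySem.List.pyGetD t i 0 = 1 then (50 : Int) else 0) + pvE2 t i) - pvE3 t i) := by
    apply List.map_congr_left
    intro i hi
    have hm := (PySem.List.mem_pyRange_one.mp hi)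
    rw [pvCamt_decomp t i hm.1 hm.2]
  rw [h, pvSum_sub, pvSum_add]
  have h2 : ((PySem.List.pyRange 0 (t.length : Int) 1).map
      (fun i => if PySem.List.pyGetD t i 0 = 1 then (50 : Int) else 0)).sum = 50 * (t.count 1 : Int) := by
    have h3 : (PySem.List.pyRange 0 (t.length : Int) 1).map
        (fun i => if PySem.List.pyGetD t i 0 = 1 then (50 : Int) else 0) =
        t.map (fun x => if x = (1 : Int) then (50 : Int) else 0) := by
      have h0 := pvMap_range_eq t (fun x => if x = (1 : Int) then (50 : Int) else 0)
      exact h0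
    rw [h3, pvSum_if_count]
  rw [h2]

lemma pvSum_e3 (t : List Int) :
    ((PySem.List.pyRange 0 (t.length : Int) 1).map (pvE3 t)).sum = 50 * pvFreeA t := by
  rcases t.eq_nil_or_concat with rfl | ⟨l, x, rfl⟩
  · rw [show ((List.length ([] : List Int)) : Int) = 0 by simp,
        PySem.List.pyRange_one_eq_nil (by norm_num : (0:Int) ≤ 0)]
    have h : pvFreeA ([] : List Int) = 0 := by decide
    simp [h]
  · simp only [List.concat_eq_append]
    have hlen : (((l ++ [x]).length : Int)) = ((l.length : Int) + 1) := by simp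
    rw [hlen, PySem.List.pyRange_one_succ_right (by positivity : (0:Int) ≤ (l.length : Int))]
    rw [List.map_append, List.sum_append]
    have hz : ((PySem.List.pyRange 0 (l.length : Int) 1).map (pvE3 (l ++ [x]))).sum = 0 := by
      apply List.sum_eq_zero
      intro y hy
      rcases List.mem_map.mp hy with ⟨i, hi, rfl⟩
      have hm := PySem.List.mem_pyRange_one.mp hi
      unfold pvE3
      rw [if_neg]
      rintro ⟨hceq, -⟩
      have hL : (((l ++ [x]).length : Int)) = (l.length : Int) + 1 := by simp
      omega
    rw [hz]
    simp only [List.map_cons, List.map_nil, List.sum_cons, List.sum_nil, zero_add, add_zero]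
    unfold pvE3 pvFreeA
    have e2 : (((l ++ [x]).length : Int)) - 2 = (l.length : Int) - 1 := by
      simp; ring
    have e1 : (l.length : Int) = (((l ++ [x]).length : Int)) - 1 := by simp
    rw [e2, ← e1]
    split_ifs with hA hB hB
    · norm_num
    · exact absurd hA.2 hB
    · exact absurd ⟨rfl, hB⟩ hA
    · norm_num

lemma pvE2_zero (u : List Int) : pvE2 u 0 = 0 := by
  unfold pvE2
  rw [if_neg]
  rintro ⟨h, -⟩
  omega

lemma pvE2_one_nil (a : Int) : pvE2 [a] 1 = 0 := by
  unfold pvE2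
  rw [if_neg]
  rintro ⟨-, h, -⟩
  simp at h

lemma pvE2_succ (a : Int) (t' : List Int) (j : Nat) :
    pvE2 (a :: t') ((j : Int) + 2) = pvE2 t' ((j : Int) + 1) := by
  unfold pvE2
  have g1 : PySem.List.pyGetD (a :: t') ((j : Int) + 2) 0 = PySem.List.pyGetD t' ((j : Int) + 1) 0 := by
    rw [show ((j : Int) + 2) = (((j + 2 : Nat)) : Int) by push_cast; ring,
        show ((j : Int) + 1) = (((j + 1 : Nat)) : Int) by push_cast; ring,
        PySem.List.pyGetD_natCast, PySem.List.pyGetD_natCast]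
    rfl
  have g2 : PySem.List.pyGetD (a :: t') ((j : Int) + 2 - 1) 0 = PySem.List.pyGetD t' ((j : Int) + 1 - 1) 0 := by
    rw [show ((j : Int) + 2 - 1) = (((j + 1 : Nat)) : Int) by push_cast; ring,
        show ((j : Int) + 1 - 1) = ((j : Nat) : Int) by omega,
        PySem.List.pyGetD_natCast, PySem.List.pyGetD_natCast]
    rfl
  have g3 : PySem.List.pyGetD (a :: t') ((j : Int) + 2 + 1) 0 = PySem.List.pyGetD t' ((j : Int) + 1 + 1) 0 := by
    rw [show ((j : Int) + 2 + 1) = (((j + 3 : Nat)) : Int) by push_cast; ring,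
        show ((j : Int) + 1 + 1) = (((j + 2 : Nat)) : Int) by push_cast; ring,
        PySem.List.pyGetD_natCast, PySem.List.pyGetD_natCast]
    rfl
  have hl : ((a :: t').length : Int) = (t'.length : Int) + 1 := by simp
  rw [g1, g2, g3, hl]
  split_ifs <;> omega

lemma pvPeel (F : Nat → Int) (m : Nat) :
    ((List.range (m + 1)).map F).sum = F 0 + ((List.range m).map (fun k => F (k + 1))).sum := by
  rw [List.range_succ_eq_map]
  simp [List.map_map, Function.comp_def, Nat.succ_eq_add_one]

lemma pvSum_e2_cons (a : Int) (t' : List Int) :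
    ((PySem.List.pyRange 0 ((a :: t').length : Int) 1).map (pvE2 (a :: t'))).sum =
      pvE2 (a :: t') 1 + ((PySem.List.pyRange 0 (t'.length : Int) 1).map (pvE2 t')).sum := by
  cases t' with
  | nil =>
      have h1 : pvE2 [a] 1 = 0 := pvE2_one_nil a
      have h0 : pvE2 [a] 0 = 0 := pvE2_zero _
      simp [PySem.List.pyRange_one, h1, h0]
  | cons b r =>
      rw [PySem.List.pyRange_one, PySem.List.pyRange_one]
      simp only [sub_zero, Int.toNat_natCast, List.map_map, Function.comp_def, zero_add,
        List.length_cons]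
      rw [pvPeel, pvPeel, pvPeel]
      have hstep : ∀ k ∈ List.range r.length,
          pvE2 (a :: b :: r) ((((k + 1 : Nat) + 1 : Nat)) : Int) = pvE2 (b :: r) (((k + 1 : Nat)) : Int) := by
        intro k _
        have e1 : (((k + 1 + 1 : Nat)) : Int) = (k : Int) + 2 := by push_cast; ring
        have e2 : (((k + 1 : Nat)) : Int) = (k : Int) + 1 := by push_cast; ring
        rw [e1, e2, pvE2_succ]
      rw [List.map_congr_left hstep]
      have c0 : (((0 : Nat)) : Int) = 0 := by norm_num
      have c1 : (((0 + 1 : Nat)) : Int) = 1 := by norm_num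
      rw [c0, c1, pvE2_zero, pvE2_zero]
      ring

lemma pvWcount_cons (a : Int) (t' : List Int) :
    pvWcount (a :: t') =
      (if 1 < t'.length ∧ t'.getD 0 0 = 1 ∧ a = 0 ∧ (t'.getD 1 0 = 0 ∨ t'.getD 1 0 = 1) then 1 else 0)
        + pvWcount t' := by
  match t' with
  | [] => simp [pvWcount]
  | [b] => simp [pvWcount]
  | b :: c :: r =>
      have hc : (1 < (b :: c :: r).length ∧ (b :: c :: r).getD 0 0 = 1 ∧ a = 0 ∧
          ((b :: c :: r).getD 1 0 = 0 ∨ (b :: c :: r).getD 1 0 = 1)) ↔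
          (b = 1 ∧ a = 0 ∧ (c = 0 ∨ c = 1)) := by
        simp only [List.length_cons, List.getD_cons_zero, List.getD_cons_succ]
        constructor
        · rintro ⟨-, h1, h2, h3⟩; exact ⟨h1, h2, h3⟩
        · rintro ⟨h1, h2, h3⟩; exact ⟨by omega, h1, h2, h3⟩
      rw [show pvWcount (a :: b :: c :: r) =
            (if b = 1 ∧ a = 0 ∧ (c = 0 ∨ c = 1) then 1 else 0) + pvWcount (b :: c :: r) from rfl]
      simp only [hc]

lemma pvHw_eq (a : Int) (t' : List Int) :
    pvE2 (a :: t') 1 = 50 * (pvWcount (a :: t') - pvWcount t') := by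
  rw [pvWcount_cons]
  unfold pvE2
  have g0 : PySem.List.pyGetD (a :: t') ((1 : Int) - 1) 0 = a := by
    rw [show ((1 : Int) - 1) = 0 by ring]
    exact PySem.List.pyGetD_zero_cons a t' 0
  have g1 : PySem.List.pyGetD (a :: t') (1 : Int) 0 = t'.getD 0 0 := by
    rw [show ((1 : Int)) = (((1 : Nat)) : Int) from rfl, PySem.List.pyGetD_natCast]
    rfl
  have g2 : PySem.List.pyGetD (a :: t') ((1 : Int) + 1) 0 = t'.getD 1 0 := by
    rw [show ((1 : Int) + 1) = (((2 : Nat)) : Int) from rfl, PySem.List.pyGetD_natCast]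
    rfl
  have hlen : ((a :: t').length : Int) = (t'.length : Int) + 1 := by simp
  rw [g0, g1, g2, hlen]
  by_cases hB : (1 < t'.length ∧ t'.getD 0 0 = 1 ∧ a = 0 ∧ (t'.getD 1 0 = 0 ∨ t'.getD 1 0 = 1))
  · have hb1 := hB.1
    have hA : (0 : Int) < 1 ∧ (1 : Int) < (t'.length : Int) + 1 - 1 ∧ t'.getD 0 0 = 1 ∧ a = 0 ∧
        (t'.getD 1 0 = 0 ∨ t'.getD 1 0 = 1) :=
      ⟨by norm_num, by omega, hB.2.1, hB.2.2.1, hB.2.2.2⟩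
    rw [if_pos hA, if_pos hB]
    ring
  · have hA : ¬((0 : Int) < 1 ∧ (1 : Int) < (t'.length : Int) + 1 - 1 ∧ t'.getD 0 0 = 1 ∧ a = 0 ∧
        (t'.getD 1 0 = 0 ∨ t'.getD 1 0 = 1)) := by
      rintro ⟨-, hl, h1, h2, h3⟩
      exact hB ⟨by omega, h1, h2, h3⟩
    rw [if_neg hA, if_neg hB]
    ring

lemma pvSum_e2 (t : List Int) :
    ((PySem.List.pyRange 0 (t.length : Int) 1).map (pvE2 t)).sum = 50 * pvWcount t := by
  induction t with
  | nil =>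
      rw [show ((List.length ([] : List Int)) : Int) = 0 by simp,
        PySem.List.pyRange_one_eq_nil (by norm_num : (0:Int) ≤ 0)]
      simp [pvWcount]
  | cons a t' ih =>
      rw [pvSum_e2_cons, ih, pvHw_eq]
      ring

lemma pvZip_wcount (t : List Int) :
    ((((t.zip (PySem.List.slice t (some 1) none)).zip (PySem.List.slice t (some 2) none)).countP
        (fun w => w.1.2 = 1 ∧ w.1.1 = 0 ∧ (w.2 = 0 ∨ w.2 = 1)) : Nat) : Int) = pvWcount t := by
  match t with
  | [] => simp [pvWcount, PySem.List.slice_from_one]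
  | [a] => simp [pvWcount, PySem.List.slice_from_one]
  | [a, b] =>
      rw [PySem.List.slice_from_one, show ((2 : Int)) = (((2 : Nat)) : Int) from rfl,
        PySem.List.slice_from_natCast]
      simp [pvWcount]
  | a :: b :: c :: r =>
      have ih := pvZip_wcount (b :: c :: r)
      rw [PySem.List.slice_from_one, show ((2 : Int)) = (((2 : Nat)) : Int) from rfl,
        PySem.List.slice_from_natCast] at ih ⊢
      simp only [List.tail_cons, List.drop_succ_cons, List.drop_zero] at ih ⊢
      rw [List.zip_cons_cons, List.zip_cons_cons, List.countP_cons]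
      rw [show pvWcount (a :: b :: c :: r) =
            (if b = 1 ∧ a = 0 ∧ (c = 0 ∨ c = 1) then 1 else 0) + pvWcount (b :: c :: r) from rfl]
      rw [← ih]
      push_cast
      by_cases h : (b = (1 : Int) ∧ a = 0 ∧ (c = 0 ∨ c = 1))
      · simp [h]
        ring
      · simp [h]

lemma pvFreeA_eq (t : List Int) : pvFreeA t = pvFreeB t + pvInd t := by
  match t with
  | [] => decide
  | [x] =>
      by_cases hx : x = (1 : Int)
      · subst hx; decide
      · unfold pvFreeA pvFreeB pvInd
        have hA : ¬(PySem.List.pyGetD [x] ((([x] : List Int).length : Int) - 1) 0 = 1 ∧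
            PySem.List.pyGetD [x] ((([x] : List Int).length : Int) - 2) 0 = 1) := by
          rintro ⟨h1, -⟩
          rw [show ((([x] : List Int).length : Int) - 1) = 0 by simp,
              PySem.List.pyGetD_zero_cons] at h1
          exact hx h1
        have hB : ¬(2 ≤ ([x] : List Int).length ∧ PySem.List.pyGetD [x] (-1) 0 = 1 ∧
            PySem.List.pyGetD [x] (-2) 0 = 1) := by
          rintro ⟨h1, -⟩
          simp at h1
        have hC : ([x] : List Int) ≠ [1] := by simp [hx]
        rw [if_neg hA, if_neg hB, if_neg hC]
        norm_num
  | x :: y :: r =>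
      have hlen2 : 2 ≤ (x :: y :: r).length := by simp
      have hne : x :: y :: r ≠ ([1] : List Int) := by simp
      unfold pvFreeA pvFreeB pvInd
      rw [if_neg hne, add_zero]
      rw [PySem.List.pyGetD_neg_ofNat _ 1 0 (by omega) (by omega),
          PySem.List.pyGetD_neg_ofNat _ 2 0 (by omega) (by omega)]
      rw [show (((x :: y :: r).length : Int) - 1) = (((x :: y :: r).length - 1 : Nat) : Int) by
            simp only [List.length_cons]; push_cast; ring,
          show (((x :: y :: r).length : Int) - 2) = (((x :: y :: r).length - 2 : Nat) : Int) by
            simp only [List.length_cons]; push_cast; ring]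
      rw [PySem.List.pyGetD_natCast, PySem.List.pyGetD_natCast,
          List.getD_eq_getElem _ _ (by simp), List.getD_eq_getElem _ _ (by simp)]
      simp [hlen2]

lemma pvTrunk_value_def (t : List Int) :
    trunk_value t =
      150 * ((PySem.List.count t 1 : Nat) : Int) -
        50 * ((((t.zip (PySem.List.slice t (some 1) none)).zip (PySem.List.slice t (some 2) none)).countP
          (fun w => w.1.2 = 1 ∧ w.1.1 = 0 ∧ (w.2 = 0 ∨ w.2 = 1)) : Nat) : Int) + 50 * pvFreeB t := rfl

lemma pvTrunk_value_eq (t : List Int) :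
    pvPsum t - pvCsum t = trunk_value t + 50 * pvInd t := by
  rw [pvPsum_eq, pvCsum_eq, pvSum_e2, pvSum_e3, pvFreeA_eq, pvTrunk_value_def, pvZip_wcount,
    PySem.List.count_eq]
  ring

lemma pvAlt_eq (truck : List (List Int)) :
    forest_cut truck = forest_cut_alt truck + 50 * (truck.map pvInd).sum := by
  rw [pvForest_cut_eq]
  have h : (truck.map (fun t => pvPsum t - pvCsum t)).sum =
      (truck.map (fun t => trunk_value t + 50 * pvInd t)).sum := by
    congr 1
    exact List.map_congr_left (fun t _ => pvTrunk_value_eq t)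
  rw [h, pvSum_add, pvSum_mul]
  rfl

lemma pvInd_sum_zero (truck : List (List Int)) (h : ([1] : List Int) ∉ truck) :
    (truck.map pvInd).sum = 0 := by
  induction truck with
  | nil => simp
  | cons a l ih =>
      simp only [List.map_cons, List.sum_cons]
      rw [ih (fun hm => h (List.mem_cons_of_mem a hm))]
      have hne : a ≠ ([1] : List Int) := fun he => h (List.mem_cons.mpr (Or.inl he.symm))
      unfold pvInd
      rw [if_neg hne]
      ring

lemma pvInd_sum_pos (truck : List (List Int)) (h : ([1] : List Int) ∈ truck) :
    1 ≤ (truck.map pvInd).sum := by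
  induction truck with
  | nil => simp at h
  | cons a l ih =>
      simp only [List.map_cons, List.sum_cons]
      have hnn : 0 ≤ (l.map pvInd).sum := by
        apply List.sum_nonneg
        intro x hx
        rcases List.mem_map.mp hx with ⟨y, -, rfl⟩
        unfold pvInd; split_ifs <;> omega
      have hnn2 : 0 ≤ pvInd a := by unfold pvInd; split_ifs <;> omega
      rcases List.mem_cons.mp h with he | hm
      · have h1 : pvInd a = 1 := by unfold pvInd; rw [if_pos he.symm]
        rw [h1]; omega
      · have := ih hm
        omega

-- ===== VERDICT (by name: the statement is the Claim_ definition above) =====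
theorem forest_cut_spec : Claim_unchanged_forest_cut := by
  intro truck _
  unfold Spec_forest_cut
  intro hnot
  unfold D_forest_cut at hnot
  rw [pvAlt_eq, pvInd_sum_zero truck hnot]
  ring

theorem forest_cut_changed : Claim_changed_forest_cut := by
  unfold Claim_changed_forest_cut; decide

theorem forest_cut_tight : Claim_exact_forest_cut := by
  intro truck _ hD
  unfold D_forest_cut at hD
  rw [pvAlt_eq]
  have := pvInd_sum_pos truck hD
  omega
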